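-- pv_equiv track=rewrite | github.com/YuneeeM/Python_Algorithm | 프로그래머스/0909/0913-4.py | solution
-- ===== SOURCE A (Python) =====
-- def solution(board):
--     n = len(board)
--
--     ch = []
--
--     for i in range(n):
--         for j in range(n):
--             if board[i][j] == 1:
--                 ch.append((i, j))
--
--     for x, y in ch:
--         for dy in [-1, 0, 1]:
--             for dx in [-1, 0, 1]:
--                 ny = y+dy
--                 nx = x+dx
--                 if 0 <= nx < n and 0 <= ny < n:
--                     board[nx][ny] = 1
--     cnt = 0
--     for x in range(n):
--         for y in range(n):
--             if board[x][y] == 0: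
--                 cnt += 1
--     return cnt
-- ===== SOURCE B (Python) =====
-- def solution(board):
--     # B: gather-style single pass (A scatters 1s into each 3x3 neighborhood, then counts).
--     # Note: A mutates `board` in place; B does not mutate. Return-value equivalence only.
--     n = len(board)
--     ones = {(i, j) for i in range(n) for j in range(n) if board[i][j] == 1}
--     cnt = 0
--     for i in range(n):
--         for j in range(n):
--             if board[i][j] == 0 and not any(
--                     (x, y) in ones
--                     for x in range(max(0, i - 1), min(n, i + 2))
--                     for y in range(max(0, j - 1), min(n, j + 2))):
--                 cnt += 1
--     return cnt
-- ===== Notes on version B (the rewrite author's own statement) =====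
-- stated objective: alternative
-- what changed: A scatters: it collects the ones, dilates each into its 3x3 neighborhood by mutating the board, then recounts zeros in a second sweep; B gathers: it snapshots the ones into a set and in one pass counts each zero cell whose clamped 3x3 neighborhood contains no original one (B does not mutate the board; equivalence is about the return value).
import Mathlib
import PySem

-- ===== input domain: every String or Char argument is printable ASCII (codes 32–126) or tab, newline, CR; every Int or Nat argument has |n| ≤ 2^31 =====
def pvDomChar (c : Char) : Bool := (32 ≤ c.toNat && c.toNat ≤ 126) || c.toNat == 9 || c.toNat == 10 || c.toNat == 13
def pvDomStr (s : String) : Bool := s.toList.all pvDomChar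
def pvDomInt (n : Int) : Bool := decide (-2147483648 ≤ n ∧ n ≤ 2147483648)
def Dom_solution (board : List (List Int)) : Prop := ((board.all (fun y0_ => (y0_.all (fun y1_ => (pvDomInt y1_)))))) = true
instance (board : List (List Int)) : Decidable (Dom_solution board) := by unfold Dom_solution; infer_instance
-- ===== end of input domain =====

-- A scatters (dilate each 1 into its 3x3 neighborhood by mutating the board, then recount zeros);
-- B gathers (one pass counting zero cells with no original 1 nearby). A mutates `board` in place,
-- B does not: the equivalence proved here is about the RETURN value only.

-- ===== PORT A =====
-- the cell-collection loop ('ch' in A; also B's set-comprehension generator)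
def pvOnes (board : List (List Int)) (n : Int) : List (Int × Int) :=
  (PySem.List.pyRange 0 n 1).foldl (fun acc i =>
    (PySem.List.pyRange 0 n 1).foldl (fun acc j =>
      if PySem.List.pyGetD (PySem.List.pyGetD board i []) j 0 = 1 then acc ++ [(i, j)] else acc)
      acc) []

-- 'board[nx][ny] = 1'
def pvWr (b : List (List Int)) (nx ny : Int) : List (List Int) :=
  PySem.List.pySetD b nx (PySem.List.pySetD (PySem.List.pyGetD b nx []) ny 1)

-- the body of A's 'for x, y in ch' loop (the two offset loops with the bounds guard)
def pvStep (n : Int) (b : List (List Int)) (p : Int × Int) : List (List Int) :=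
  ([-1, 0, 1] : List Int).foldl (fun b dy =>
    ([-1, 0, 1] : List Int).foldl (fun b dx =>
      if 0 ≤ p.1 + dx ∧ p.1 + dx < n ∧ 0 ≤ p.2 + dy ∧ p.2 + dy < n then
        pvWr b (p.1 + dx) (p.2 + dy)
      else b) b) b

def solution (board : List (List Int)) : Int :=
  let n : Int := board.length
  let ch := pvOnes board n
  let board2 := ch.foldl (pvStep n) board
  (PySem.List.pyRange 0 n 1).foldl (fun cnt x =>
    (PySem.List.pyRange 0 n 1).foldl (fun cnt y =>
      if PySem.List.pyGetD (PySem.List.pyGetD board2 x []) y 0 = 0 then cnt + 1 else cnt)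
      cnt) 0

-- ===== PORT B =====
def solution_alt (board : List (List Int)) : Int :=
  let n : Int := board.length
  let ones : PySem.Set (Int × Int) := PySem.Set.ofList (pvOnes board n)
  (PySem.List.pyRange 0 n 1).foldl (fun cnt i =>
    (PySem.List.pyRange 0 n 1).foldl (fun cnt j =>
      if PySem.List.pyGetD (PySem.List.pyGetD board i []) j 0 = 0 ∧
          ¬ ((PySem.List.pyRange (max 0 (i - 1)) (min n (i + 2)) 1).any (fun x =>
               (PySem.List.pyRange (max 0 (j - 1)) (min n (j + 2)) 1).any (fun y =>
                 PySem.Set.contains ones (x, y))) = true)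
      then cnt + 1 else cnt) cnt) 0

-- ===== PRECONDITION & SPEC =====
-- A indexes board[i][j] for all i, j < len(board): any row shorter than len(board) raises IndexError.
def Pre_solution (board : List (List Int)) : Prop :=
  ∀ row ∈ board, board.length ≤ row.length
instance (board : List (List Int)) : Decidable (Pre_solution board) := by
  unfold Pre_solution; infer_instance

def pvWitness_solution : List (List Int) := [[1, 0, 0], [0, 0, 0], [0, 0, 0]]

def Spec_solution (board : List (List Int)) (out : Int) : Prop := out = solution_alt board
instance (board : List (List Int)) (out : Int) : Decidable (Spec_solution board out) := by
  unfold Spec_solution; infer_instance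

-- ===== CLAIM (what is proved, stated in full; the proofs are below) =====
def Claim_equal_solution : Prop := ∀ (board : List (List Int)),
  Dom_solution board → Pre_solution board → Spec_solution board (solution board)

-- ===== LEMMAS AND PROOFS =====

-- cell read board[i][j] (proof-side abbreviation)
def gc (b : List (List Int)) (i j : Int) : Int :=
  PySem.List.pyGetD (PySem.List.pyGetD b i []) j 0

theorem pyGetD_toNat {a : Type} (xs : List a) (i : Int) (d : a) (h : 0 ≤ i) :
    PySem.List.pyGetD xs i d = xs.getD i.toNat d := by
  have := PySem.List.pyGetD_natCast (n := i.toNat) (xs := xs) (d := d)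
  rwa [Int.toNat_of_nonneg h] at this

-- membership in a fold that appends under a condition
theorem mem_foldl_append_if {a b : Type} (l : List a) (P : a → Prop) [DecidablePred P]
    (f : a → b) (acc : List b) (x : b) :
    (x ∈ l.foldl (fun acc e => if P e then acc ++ [f e] else acc) acc) ↔
      x ∈ acc ∨ ∃ e ∈ l, P e ∧ x = f e := by
  induction l generalizing acc with
  | nil => simp
  | cons h t ih =>
    simp only [List.foldl_cons, ih]
    by_cases hp : P h <;> simp [hp] <;> aesop

-- membership in a fold whose body adds a block per element
theorem mem_foldl_blocks {a b : Type} (l : List a) (F : a → List b → List b)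
    (Q : a → b → Prop) (hF : ∀ e acc x, (x ∈ F e acc) ↔ x ∈ acc ∨ Q e x)
    (acc : List b) (x : b) :
    (x ∈ l.foldl (fun acc e => F e acc) acc) ↔ x ∈ acc ∨ ∃ e ∈ l, Q e x := by
  induction l generalizing acc with
  | nil => simp
  | cons h t ih => simp only [List.foldl_cons, ih, hF]; aesop

theorem mem_pvOnes (board : List (List Int)) (n : Int) (p : Int × Int) :
    p ∈ pvOnes board n ↔
      (0 ≤ p.1 ∧ p.1 < n) ∧ (0 ≤ p.2 ∧ p.2 < n) ∧ gc board p.1 p.2 = 1 := by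
  unfold pvOnes
  rw [mem_foldl_blocks (PySem.List.pyRange 0 n 1)
        (fun i acc => (PySem.List.pyRange 0 n 1).foldl
          (fun acc j => if PySem.List.pyGetD (PySem.List.pyGetD board i []) j 0 = 1
            then acc ++ [(i, j)] else acc) acc)
        (fun i x => ∃ j ∈ PySem.List.pyRange 0 n 1,
          PySem.List.pyGetD (PySem.List.pyGetD board i []) j 0 = 1 ∧ x = (i, j))
        (fun i acc x => mem_foldl_append_if _ _ _ _ _)]
  simp only [PySem.List.mem_pyRange_one, List.not_mem_nil, false_or, gc]
  constructor
  · rintro ⟨i, hi, j, hj, h1, rfl⟩; exact ⟨hi, hj, h1⟩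
  · rintro ⟨hi, hj, h1⟩; exact ⟨p.1, hi, p.2, hj, h1, rfl⟩

-- a write preserves the row-length profile
theorem shape_pvWr (b : List (List Int)) (nx ny : Int) (h0 : 0 ≤ nx) (h1 : 0 ≤ ny) :
    (pvWr b nx ny).map List.length = b.map List.length := by
  unfold pvWr
  rw [PySem.List.pySetD_of_nonneg _ _ h0, PySem.List.pySetD_of_nonneg _ _ h1,
      pyGetD_toNat _ _ _ h0]
  apply List.ext_getElem?
  intro k
  rw [List.getElem?_map, List.getElem?_map]
  by_cases hk : k = nx.toNat
  · subst hk
    by_cases hlt : nx.toNat < b.length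
    · rw [List.getElem?_set_self (by simpa using hlt)]
      simp [List.getD, List.getElem?_eq_getElem hlt, List.getElem?_eq_getElem (l := b) hlt]
    · rw [List.set_eq_of_length_le (by omega)]
  · rw [List.getElem?_set_ne (by omega)]

-- reading after a single in-bounds write
theorem gc_pvWr (b : List (List Int)) (nx ny x y : Int)
    (hnx0 : 0 ≤ nx) (hnx : nx < (b.length : Int))
    (hny0 : 0 ≤ ny) (hny : ny < ((PySem.List.pyGetD b nx []).length : Int))
    (hx0 : 0 ≤ x) (hx : x < (b.length : Int)) (hy0 : 0 ≤ y) :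
    gc (pvWr b nx ny) x y = if nx = x ∧ ny = y then 1 else gc b x y := by
  unfold pvWr gc
  rw [PySem.List.pySetD_of_nonneg _ _ hnx0, PySem.List.pySetD_of_nonneg _ _ hny0,
      pyGetD_toNat _ nx _ hnx0, pyGetD_toNat _ x _ hx0, pyGetD_toNat _ x _ hx0,
      pyGetD_toNat _ y _ hy0, pyGetD_toNat _ y _ hy0]
  have hnxl : nx.toNat < b.length := by omega
  have hxl : x.toNat < b.length := by omega
  rw [pyGetD_toNat _ nx _ hnx0] at hny
  have hrow : b.getD nx.toNat [] = b[nx.toNat] := by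
    simp [List.getD, List.getElem?_eq_getElem hnxl]
  have hnyl : ny.toNat < (b[nx.toNat]).length := by rw [hrow] at hny; omega
  by_cases hxx : nx = x
  · subst hxx
    rw [hrow]
    have : (b.set nx.toNat (b[nx.toNat].set ny.toNat 1)).getD nx.toNat []
        = b[nx.toNat].set ny.toNat 1 := by
      simp [List.getD, List.getElem?_set_self (by simpa using hnxl)]
    rw [this]
    by_cases hyy : ny = y
    · subst hyy
      simp [List.getD, List.getElem?_set_self (by simpa using hnyl)]
    · have : ny.toNat ≠ y.toNat := by omega
      simp only [List.getD, List.getElem?_set_ne this, true_and, if_neg hyy]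
  · have : nx.toNat ≠ x.toNat := by omega
    rw [if_neg (by tauto)]
    simp [List.getD, List.getElem?_set_ne this]

theorem shape_length {b c : List (List Int)} (h : b.map List.length = c.map List.length) :
    b.length = c.length := by
  simpa using congrArg List.length h

theorem shape_row {b u : List (List Int)} (h : b.map List.length = u.map List.length)
    (k : Nat) (hk : k < b.length) (hk' : k < u.length) :
    (b[k]).length = (u[k]).length := by
  have h1 : (b.map List.length)[k]? = (u.map List.length)[k]? := by rw [h]
  rw [List.getElem?_map, List.getElem?_map, List.getElem?_eq_getElem hk,
      List.getElem?_eq_getElem hk'] at h1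
  simpa using h1

-- the dx loop: value + shape, by induction on the offset list
theorem gc_fold_dx (board : List (List Int)) (hpre : Pre_solution board)
    (x y : Int) (hx0 : 0 ≤ x) (hx : x < (board.length : Int))
    (hy0 : 0 ≤ y) (hy : y < (board.length : Int))
    (p : Int × Int) (dy : Int) (dxs : List Int) :
    ∀ b, b.map List.length = board.map List.length →
      ((dxs.foldl (fun b dx =>
          if 0 ≤ p.1 + dx ∧ p.1 + dx < (board.length : Int) ∧
             0 ≤ p.2 + dy ∧ p.2 + dy < (board.length : Int) then
            pvWr b (p.1 + dx) (p.2 + dy)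
          else b) b).map List.length = board.map List.length) ∧
      gc (dxs.foldl (fun b dx =>
          if 0 ≤ p.1 + dx ∧ p.1 + dx < (board.length : Int) ∧
             0 ≤ p.2 + dy ∧ p.2 + dy < (board.length : Int) then
            pvWr b (p.1 + dx) (p.2 + dy)
          else b) b) x y
        = if ∃ dx ∈ dxs, p.1 + dx = x ∧ p.2 + dy = y then 1 else gc b x y := by
  induction dxs with
  | nil => intro b hb; simpa using hb
  | cons d rest ih =>
    intro b hb
    -- the board after the first guarded write
    have hb1 : (if 0 ≤ p.1 + d ∧ p.1 + d < (board.length : Int) ∧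
          0 ≤ p.2 + dy ∧ p.2 + dy < (board.length : Int) then
        pvWr b (p.1 + d) (p.2 + dy) else b).map List.length = board.map List.length := by
      split_ifs with hg
      · rw [shape_pvWr _ _ _ hg.1 hg.2.2.1]; exact hb
      · exact hb
    obtain ⟨ihs, ihv⟩ := ih _ hb1
    refine ⟨by simpa using ihs, ?_⟩
    simp only [List.foldl_cons]
    rw [ihv]
    have hlen : b.length = board.length := shape_length hb
    have hcons : (∃ dx ∈ d :: rest, p.1 + dx = x ∧ p.2 + dy = y) ↔
        ((p.1 + d = x ∧ p.2 + dy = y) ∨ ∃ dx ∈ rest, p.1 + dx = x ∧ p.2 + dy = y) := by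
      constructor
      · rintro ⟨dx, hm, hh⟩
        rcases List.mem_cons.mp hm with rfl | hm'
        · exact Or.inl hh
        · exact Or.inr ⟨dx, hm', hh⟩
      · rintro (hh | ⟨dx, hm, hh⟩)
        · exact ⟨d, List.mem_cons_self, hh⟩
        · exact ⟨dx, List.mem_cons_of_mem _ hm, hh⟩
    have hrowlen : ∀ nx : Int, 0 ≤ nx → nx < (board.length : Int) →
        (board.length : Int) ≤ ((PySem.List.pyGetD b nx []).length : Int) := by
      intro nx h0 h1
      rw [pyGetD_toNat _ _ _ h0]
      have hkl : nx.toNat < b.length := by omega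
      have hget : b.getD nx.toNat [] = b[nx.toNat] := by
        simp [List.getD, List.getElem?_eq_getElem hkl]
      rw [hget, shape_row hb _ hkl (by omega)]
      have hmem : board[nx.toNat]'(by omega) ∈ board := List.getElem_mem _
      have := hpre _ hmem
      omega
    by_cases hrest : ∃ dx ∈ rest, p.1 + dx = x ∧ p.2 + dy = y
    · rw [if_pos hrest, if_pos (hcons.mpr (Or.inr hrest))]
    · rw [if_neg hrest]
      by_cases hhit : p.1 + d = x ∧ p.2 + dy = y
      · have hg : 0 ≤ p.1 + d ∧ p.1 + d < (board.length : Int) ∧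
            0 ≤ p.2 + dy ∧ p.2 + dy < (board.length : Int) := by
          rw [hhit.1, hhit.2]; exact ⟨hx0, hx, hy0, hy⟩
        rw [if_pos (hcons.mpr (Or.inl hhit)), if_pos hg,
            gc_pvWr b _ _ x y hg.1 (by omega) hg.2.2.1
              (by have := hrowlen _ hg.1 hg.2.1; omega) hx0 (by omega) hy0,
            if_pos hhit]
      · rw [if_neg (fun hc => (hcons.mp hc).elim hhit hrest)]
        split_ifs with hg
        · rw [gc_pvWr b _ _ x y hg.1 (by omega) hg.2.2.1
              (by have := hrowlen _ hg.1 hg.2.1; omega) hx0 (by omega) hy0,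
              if_neg hhit]
        · rfl

-- the dy loop (both offset loops): value + shape
theorem gc_fold_dy (board : List (List Int)) (hpre : Pre_solution board)
    (x y : Int) (hx0 : 0 ≤ x) (hx : x < (board.length : Int))
    (hy0 : 0 ≤ y) (hy : y < (board.length : Int))
    (p : Int × Int) (dxs dys : List Int) :
    ∀ b, b.map List.length = board.map List.length →
      ((dys.foldl (fun b dy => dxs.foldl (fun b dx =>
          if 0 ≤ p.1 + dx ∧ p.1 + dx < (board.length : Int) ∧
             0 ≤ p.2 + dy ∧ p.2 + dy < (board.length : Int) then
            pvWr b (p.1 + dx) (p.2 + dy)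
          else b) b) b).map List.length = board.map List.length) ∧
      gc (dys.foldl (fun b dy => dxs.foldl (fun b dx =>
          if 0 ≤ p.1 + dx ∧ p.1 + dx < (board.length : Int) ∧
             0 ≤ p.2 + dy ∧ p.2 + dy < (board.length : Int) then
            pvWr b (p.1 + dx) (p.2 + dy)
          else b) b) b) x y
        = if ∃ dy ∈ dys, ∃ dx ∈ dxs, p.1 + dx = x ∧ p.2 + dy = y then 1
          else gc b x y := by
  induction dys with
  | nil => intro b hb; simpa using hb
  | cons d rest ih =>
    intro b hb
    obtain ⟨hs1, hv1⟩ := gc_fold_dx board hpre x y hx0 hx hy0 hy p d dxs b hb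
    obtain ⟨ihs, ihv⟩ := ih _ hs1
    refine ⟨by simpa using ihs, ?_⟩
    simp only [List.foldl_cons]
    rw [ihv, hv1]
    have hcons : (∃ dy ∈ d :: rest, ∃ dx ∈ dxs, p.1 + dx = x ∧ p.2 + dy = y) ↔
        ((∃ dx ∈ dxs, p.1 + dx = x ∧ p.2 + d = y) ∨
          ∃ dy ∈ rest, ∃ dx ∈ dxs, p.1 + dx = x ∧ p.2 + dy = y) := by
      constructor
      · rintro ⟨dy, hm, hh⟩
        rcases List.mem_cons.mp hm with rfl | hm'
        · exact Or.inl hh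
        · exact Or.inr ⟨dy, hm', hh⟩
      · rintro (hh | ⟨dy, hm, hh⟩)
        · exact ⟨d, List.mem_cons_self, hh⟩
        · exact ⟨dy, List.mem_cons_of_mem _ hm, hh⟩
    by_cases hrest : ∃ dy ∈ rest, ∃ dx ∈ dxs, p.1 + dx = x ∧ p.2 + dy = y
    · rw [if_pos hrest, if_pos (hcons.mpr (Or.inr hrest))]
    · rw [if_neg hrest]
      by_cases hhd : ∃ dx ∈ dxs, p.1 + dx = x ∧ p.2 + d = y
      · rw [if_pos hhd, if_pos (hcons.mpr (Or.inl hhd))]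
      · rw [if_neg hhd, if_neg (fun hc => (hcons.mp hc).elim hhd hrest)]

-- the whole scatter loop 'for x, y in ch'
theorem gc_fold_ch (board : List (List Int)) (hpre : Pre_solution board)
    (x y : Int) (hx0 : 0 ≤ x) (hx : x < (board.length : Int))
    (hy0 : 0 ≤ y) (hy : y < (board.length : Int)) (ch : List (Int × Int)) :
    ∀ b, b.map List.length = board.map List.length →
      gc (ch.foldl (pvStep (board.length : Int)) b) x y
        = if ∃ p ∈ ch, p.1 - 1 ≤ x ∧ x ≤ p.1 + 1 ∧ p.2 - 1 ≤ y ∧ y ≤ p.2 + 1 then 1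
          else gc b x y := by
  induction ch with
  | nil => intro b hb; simp
  | cons p rest ih =>
    intro b hb
    obtain ⟨hs1, hv1⟩ := gc_fold_dy board hpre x y hx0 hx hy0 hy p
      ([-1, 0, 1] : List Int) ([-1, 0, 1] : List Int) b hb
    simp only [List.foldl_cons]
    have hstep : pvStep (board.length : Int) b p
        = (([-1, 0, 1] : List Int).foldl (fun b dy => ([-1, 0, 1] : List Int).foldl (fun b dx =>
            if 0 ≤ p.1 + dx ∧ p.1 + dx < (board.length : Int) ∧
               0 ≤ p.2 + dy ∧ p.2 + dy < (board.length : Int) then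
              pvWr b (p.1 + dx) (p.2 + dy)
            else b) b) b) := rfl
    rw [hstep, ih _ hs1, hv1]
    have hnear : (∃ dy ∈ ([-1, 0, 1] : List Int), ∃ dx ∈ ([-1, 0, 1] : List Int),
          p.1 + dx = x ∧ p.2 + dy = y) ↔
        (p.1 - 1 ≤ x ∧ x ≤ p.1 + 1 ∧ p.2 - 1 ≤ y ∧ y ≤ p.2 + 1) := by
      simp only [List.mem_cons, List.not_mem_nil, or_false]
      constructor
      · rintro ⟨dy, hdy, dx, hdx, rfl, rfl⟩
        rcases hdy with rfl | rfl | rfl <;> rcases hdx with rfl | rfl | rfl <;>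
          refine ⟨by omega, by omega, by omega, by omega⟩
      · rintro ⟨h1, h2, h3, h4⟩
        refine ⟨y - p.2, by omega, x - p.1, by omega, by omega, by omega⟩
    have hcons : (∃ q ∈ p :: rest, q.1 - 1 ≤ x ∧ x ≤ q.1 + 1 ∧ q.2 - 1 ≤ y ∧ y ≤ q.2 + 1) ↔
        ((p.1 - 1 ≤ x ∧ x ≤ p.1 + 1 ∧ p.2 - 1 ≤ y ∧ y ≤ p.2 + 1) ∨
          ∃ q ∈ rest, q.1 - 1 ≤ x ∧ x ≤ q.1 + 1 ∧ q.2 - 1 ≤ y ∧ y ≤ q.2 + 1) := by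
      constructor
      · rintro ⟨q, hm, hh⟩
        rcases List.mem_cons.mp hm with rfl | hm'
        · exact Or.inl hh
        · exact Or.inr ⟨q, hm', hh⟩
      · rintro (hh | ⟨q, hm, hh⟩)
        · exact ⟨p, List.mem_cons_self, hh⟩
        · exact ⟨q, List.mem_cons_of_mem _ hm, hh⟩
    by_cases hrest : ∃ q ∈ rest, q.1 - 1 ≤ x ∧ x ≤ q.1 + 1 ∧ q.2 - 1 ≤ y ∧ y ≤ q.2 + 1
    · rw [if_pos hrest, if_pos (hcons.mpr (Or.inr hrest))]
    · rw [if_neg hrest]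
      by_cases hhd : p.1 - 1 ≤ x ∧ x ≤ p.1 + 1 ∧ p.2 - 1 ≤ y ∧ y ≤ p.2 + 1
      · rw [if_pos (hnear.mpr hhd), if_pos (hcons.mpr (Or.inl hhd))]
      · rw [if_neg (fun hc => hhd (hnear.mp hc)),
            if_neg (fun hc => (hcons.mp hc).elim hhd hrest)]

-- B's neighborhood scan over the set equals 'some collected 1 is near'
theorem cover_iff (board : List (List Int)) (i j : Int)
    (hi0 : 0 ≤ i) (hi : i < (board.length : Int)) (hj0 : 0 ≤ j) (hj : j < (board.length : Int)) :
    ((PySem.List.pyRange (max 0 (i - 1)) (min (board.length : Int) (i + 2)) 1).any (fun x =>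
        (PySem.List.pyRange (max 0 (j - 1)) (min (board.length : Int) (j + 2)) 1).any (fun y =>
          PySem.Set.contains (PySem.Set.ofList (pvOnes board (board.length : Int))) (x, y))) = true)
      ↔ ∃ p ∈ pvOnes board (board.length : Int),
          p.1 - 1 ≤ i ∧ i ≤ p.1 + 1 ∧ p.2 - 1 ≤ j ∧ j ≤ p.2 + 1 := by
  simp only [List.any_eq_true, PySem.List.mem_pyRange_one, PySem.Set.contains_iff,
    PySem.Set.mem_ofList]
  constructor
  · rintro ⟨x, hx, y, hy, hmem⟩
    exact ⟨(x, y), hmem, by omega⟩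
  · rintro ⟨p, hmem, hnear⟩
    have hb := (mem_pvOnes board _ p).mp hmem
    exact ⟨p.1, by omega, p.2, by omega, by simpa using hmem⟩

-- the two counting conditions agree cell by cell
theorem cond_iff (board : List (List Int)) (hpre : Pre_solution board) (i j : Int)
    (hi0 : 0 ≤ i) (hi : i < (board.length : Int)) (hj0 : 0 ≤ j) (hj : j < (board.length : Int)) :
    (PySem.List.pyGetD (PySem.List.pyGetD
        ((pvOnes board (board.length : Int)).foldl (pvStep (board.length : Int)) board) i []) j 0 = 0)
      ↔ (PySem.List.pyGetD (PySem.List.pyGetD board i []) j 0 = 0 ∧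
          ¬ ((PySem.List.pyRange (max 0 (i - 1)) (min (board.length : Int) (i + 2)) 1).any (fun x =>
               (PySem.List.pyRange (max 0 (j - 1)) (min (board.length : Int) (j + 2)) 1).any (fun y =>
                 PySem.Set.contains (PySem.Set.ofList (pvOnes board (board.length : Int))) (x, y))) = true)) := by
  have hchar := gc_fold_ch board hpre i j hi0 hi hj0 hj (pvOnes board (board.length : Int)) board rfl
  have hcov := cover_iff board i j hi0 hi hj0 hj
  show gc ((pvOnes board (board.length : Int)).foldl (pvStep (board.length : Int)) board) i j = 0 ↔ (gc board i j = 0 ∧ _)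
  rw [hchar]
  by_cases hc : ∃ p ∈ pvOnes board (board.length : Int),
      p.1 - 1 ≤ i ∧ i ≤ p.1 + 1 ∧ p.2 - 1 ≤ j ∧ j ≤ p.2 + 1
  · rw [if_pos hc]
    simp only [hcov]
    constructor
    · intro h; omega
    · rintro ⟨-, hnc⟩; exact absurd hc hnc
  · rw [if_neg hc]
    simp only [hcov]
    tauto

-- ===== VERDICT (by name: the statement is the Claim_ definition above) =====
theorem solution_spec : Claim_equal_solution := by
  intro board hdom hpre
  unfold Spec_solution
  simp only [solution, solution_alt]
  apply PySem.List.foldl_congr_mem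
  intro acc i hi
  apply PySem.List.foldl_congr_mem
  intro acc' j hj
  rw [PySem.List.mem_pyRange_one] at hi hj
  exact if_congr (cond_iff board hpre i j hi.1 hi.2 hj.1 hj.2) rfl rfl
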